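-- pv_equiv track=rewrite | github.com/seqeralabs/docs | platform-cloud/docs/cli/scripts/extract-overlays.py | clean_for_overlay
-- ===== SOURCE A (Python) =====
-- def clean_for_overlay(content):
--     """Clean content for overlay format (remove heading, keep examples and context)."""
--     lines = content.split('\n')
--     cleaned = []
--
--     skip_first_heading = True
--
--     for line in lines:
--         # Skip the first ### heading (operation name) since it's in the generated docs
--         if skip_first_heading and line.startswith('### '):
--             skip_first_heading = False
--             continue
--
--         cleaned.append(line)
--
--     return '\n'.join(cleaned).strip()
-- ===== SOURCE B (Python) =====
-- def clean_for_overlay(content):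
--     """Clean content for overlay format (remove heading, keep examples and context)."""
--     # Locate the start of the first line beginning with '### ' (if any) ...
--     if content.startswith('### '):
--         start = 0
--     else:
--         j = content.find('\n### ')
--         start = j + 1 if j != -1 else -1
--     if start == -1:
--         return content.strip()
--     # ... and splice it out up to (and including) its terminating newline.
--     end = content.find('\n', start)
--     if end == -1:
--         return content[:start].strip()
--     return (content[:start] + content[end + 1:]).strip()
-- ===== Notes on version B (the rewrite author's own statement) =====
-- stated objective: alternative
-- what changed: Instead of splitting into a list of lines and re-joining them through a flag-guarded filter loop, B locates the start of the first heading line directly in the whole string with str.startswith/str.find and splices the line out with two slices; no line list is ever built.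
import Mathlib
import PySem

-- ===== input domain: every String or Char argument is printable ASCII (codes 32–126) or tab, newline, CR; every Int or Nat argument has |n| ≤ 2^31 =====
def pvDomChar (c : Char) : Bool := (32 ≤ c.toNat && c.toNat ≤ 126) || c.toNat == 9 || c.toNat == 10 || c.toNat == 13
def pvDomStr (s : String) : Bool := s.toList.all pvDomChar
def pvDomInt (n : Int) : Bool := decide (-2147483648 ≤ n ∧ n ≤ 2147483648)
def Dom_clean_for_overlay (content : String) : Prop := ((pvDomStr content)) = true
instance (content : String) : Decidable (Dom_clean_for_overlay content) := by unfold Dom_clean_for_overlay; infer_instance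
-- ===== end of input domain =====

-- B locates the first '### ' heading line with startswith/find on the whole string and splices it
-- out with two slices, instead of A's split-into-lines flag-filter loop (alternative, no speed claim).

-- ===== PORT A =====
def clean_for_overlay (content : String) : String :=
  -- lines = content.split('\n')   (the separator "\n" is nonempty, so split? is `some`)
  let lines : List String := (PySem.Str.split? content "\n").getD []
  -- for line in lines: skip the first line starting with '### ', append every other line
  let st : List String × Bool := lines.foldl
    (fun st line =>
      if st.2 && PySem.Str.startswith line "### " then (st.1, false)
      else (st.1 ++ [line], st.2))
    ([], true)
  -- return '\n'.join(cleaned).strip()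
  PySem.Str.strip (PySem.Str.join "\n" st.1)

-- ===== PORT B =====
def clean_for_overlay_alt (content : String) : String :=
  let start : Int :=
    if PySem.Str.startswith content "### " then 0
    else
      let j := PySem.Str.find content "\n### "
      if j ≠ -1 then j + 1 else -1
  if start = -1 then PySem.Str.strip content
  else
    let e := PySem.Str.findFrom content "\n" start none
    if e = -1 then PySem.Str.strip (PySem.Str.slice content none (some start))
    else
      -- content[:start] + content[end+1:]   (the `+` done on the char lists)
      PySem.Str.strip (String.ofList
        ((PySem.Str.slice content none (some start)).toList ++
         (PySem.Str.slice content (some (e + 1)) none).toList))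

-- ===== PRECONDITION & SPEC =====
def Spec_clean_for_overlay (content : String) (out : String) : Prop := out = clean_for_overlay_alt content
instance (content : String) (out : String) : Decidable (Spec_clean_for_overlay content out) := by unfold Spec_clean_for_overlay; infer_instance

-- ===== CLAIM (what is proved, stated in full; the proofs are below) =====
def Claim_equal_clean_for_overlay : Prop := ∀ (content : String), Dom_clean_for_overlay content → Spec_clean_for_overlay content (clean_for_overlay content)

-- ===== LEMMAS AND PROOFS =====

def hd4 : List Char := "### ".toList
def nlH : List Char := "\n### ".toList

def isHead (l : List Char) : Bool := PySem.Chars.startswith l hd4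

def joinNL : List (List Char) → List Char
  | [] => []
  | [l] => l
  | l :: ls => l ++ '\n' :: joinNL ls

def rmFirst : List (List Char) → List (List Char)
  | [] => []
  | l :: ls => if isHead l then ls else l :: rmFirst ls

def mySplit : List Char → List (List Char)
  | [] => [[]]
  | c :: rest =>
    if c = '\n' then [] :: mySplit rest
    else
      match mySplit rest with
      | [] => [[c]]
      | l :: ls => (c :: l) :: ls

def consH (x : List Char) : List (List Char) → List (List Char)
  | [] => [x]
  | m :: ms => (x ++ m) :: ms

def rmFirstS : List String → List String
  | [] => []
  | l :: ls => if PySem.Str.startswith l "### " then ls else l :: rmFirstS ls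

def altTail (cs : List Char) (start : Int) : List Char :=
  if PySem.Chars.findFrom cs ['\n'] start none = -1 then
    PySem.Chars.slice cs none (some start)
  else
    PySem.Chars.slice cs none (some start) ++
      PySem.Chars.slice cs (some (PySem.Chars.findFrom cs ['\n'] start none + 1)) none

def altCore (cs : List Char) : List Char :=
  if PySem.Chars.startswith cs hd4 then altTail cs 0
  else if PySem.Chars.find cs nlH = -1 then cs
  else altTail cs (PySem.Chars.find cs nlH + 1)

lemma nlH_eq : nlH = '\n' :: hd4 := by decide

lemma hd4_no_nl : '\n' ∉ hd4 := by decide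

lemma nl_toList : ("\n" : String).toList = ['\n'] := by decide

-- ---- mySplit / joinNL basics ----

lemma mySplit_ne_nil : ∀ cs : List Char, mySplit cs ≠ [] := by
  intro cs
  induction cs with
  | nil => simp [mySplit]
  | cons c rest ih =>
    by_cases hc : c = '\n'
    · simp [mySplit, hc]
    · simp only [mySplit, if_neg hc]
      rcases h : mySplit rest with _ | ⟨l, ls⟩ <;> simp

lemma joinNL_cons (l : List Char) (ls : List (List Char)) (h : ls ≠ []) :
    joinNL (l :: ls) = l ++ '\n' :: joinNL ls := by
  cases ls with
  | nil => exact absurd rfl h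
  | cons m ms => rfl

lemma join_mySplit : ∀ cs : List Char, joinNL (mySplit cs) = cs := by
  intro cs
  induction cs with
  | nil => rfl
  | cons c rest ih =>
    by_cases hc : c = '\n'
    · subst hc
      have hms : mySplit ('\n' :: rest) = [] :: mySplit rest := by simp [mySplit]
      rw [hms, joinNL_cons _ _ (mySplit_ne_nil rest), ih]
      rfl
    · simp only [mySplit, if_neg hc]
      rcases h : mySplit rest with _ | ⟨l, ls⟩
      · exact absurd h (mySplit_ne_nil rest)
      · rw [h] at ih
        cases ls with
        | nil => simpa [joinNL] using congrArg (c :: ·) ih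
        | cons m ms =>
          rw [joinNL_cons _ _ (by simp)] at ih
          rw [joinNL_cons _ _ (by simp), List.cons_append, ih]

lemma mySplit_no_nl : ∀ (cs : List Char) (l : List Char), l ∈ mySplit cs → '\n' ∉ l := by
  intro cs
  induction cs with
  | nil => intro l hl; simp [mySplit] at hl; simp [hl]
  | cons c rest ih =>
    intro l hl
    by_cases hc : c = '\n'
    · simp only [mySplit, if_pos hc, List.mem_cons] at hl
      rcases hl with rfl | hl
      · simp
      · exact ih l hl
    · simp only [mySplit, if_neg hc] at hl
      rcases h : mySplit rest with _ | ⟨m, ms⟩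
      · exact absurd h (mySplit_ne_nil rest)
      · rw [h] at hl
        simp only [List.mem_cons] at hl
        rcases hl with rfl | hl
        · intro hmem
          rcases List.mem_cons.mp hmem with h' | h'
          · exact hc h'.symm
          · exact ih m (by rw [h]; exact List.mem_cons_self ..) h'
        · exact ih l (by rw [h]; exact List.mem_cons_of_mem _ hl)

-- ---- splitOn = mySplit ----

lemma go_eq : ∀ (l : List Char) (fuel : Nat) (cur : List Char) (acc : List (List Char)),
    l.length ≤ fuel →
    PySem.Chars.splitOn.go ['\n'] fuel l cur acc = acc.reverse ++ consH cur.reverse (mySplit l) := by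
  intro l
  induction l with
  | nil =>
    intro fuel cur acc _
    cases fuel <;> simp [PySem.Chars.splitOn.go, mySplit, consH]
  | cons c rest ih =>
    intro fuel cur acc hf
    cases fuel with
    | zero => simp at hf
    | succ f =>
      simp only [PySem.Chars.splitOn.go]
      by_cases hc : c = '\n'
      · subst hc
        have hpre : ['\n'].isPrefixOf ('\n' :: rest) = true := by
          rw [List.isPrefixOf_iff_prefix]; exact ⟨rest, rfl⟩
        rw [if_pos hpre]
        simp only [List.length_cons, List.length_nil, List.drop_succ_cons, List.drop_zero]
        rw [ih f [] (cur.reverse :: acc) (by simpa using Nat.le_of_succ_le_succ hf)]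
        rcases h : mySplit rest with _ | ⟨m, ms⟩
        · exact absurd h (mySplit_ne_nil rest)
        · simp [mySplit, consH, h]
      · have hpre : ¬ (['\n'].isPrefixOf (c :: rest) = true) := by
          rw [List.isPrefixOf_iff_prefix, List.cons_prefix_cons]
          rintro ⟨h, -⟩; exact hc h.symm
        rw [if_neg hpre]
        rw [ih f (c :: cur) acc (by simpa using Nat.le_of_succ_le_succ hf)]
        rcases h : mySplit rest with _ | ⟨m, ms⟩
        · exact absurd h (mySplit_ne_nil rest)
        · simp [mySplit, hc, h, consH, List.append_assoc]

lemma splitOn_eq (cs : List Char) : PySem.Chars.splitOn cs ['\n'] = mySplit cs := by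
  unfold PySem.Chars.splitOn
  rw [go_eq cs (cs.length + 1) [] [] (by omega)]
  rcases h : mySplit cs with _ | ⟨m, ms⟩
  · exact absurd h (mySplit_ne_nil cs)
  · simp [consH]

-- ---- A's loop = rmFirstS ----

lemma fold_false (L : List String) : ∀ acc : List String,
    L.foldl
      (fun st line =>
        if st.2 && PySem.Str.startswith line "### " then (st.1, false)
        else (st.1 ++ [line], st.2))
      (acc, false) = (acc ++ L, false) := by
  induction L with
  | nil => simp
  | cons l ls ih =>
    intro acc
    simp only [List.foldl_cons, Bool.false_and, Bool.false_eq_true, if_false]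
    rw [ih]
    simp

lemma fold_true (L : List String) : ∀ acc : List String,
    L.foldl
      (fun st line =>
        if st.2 && PySem.Str.startswith line "### " then (st.1, false)
        else (st.1 ++ [line], st.2))
      (acc, true) = (acc ++ rmFirstS L, !(L.any (fun l => PySem.Str.startswith l "### "))) := by
  induction L with
  | nil => simp [rmFirstS]
  | cons l ls ih =>
    intro acc
    rw [List.foldl_cons]
    by_cases h : PySem.Str.startswith l "### " = true
    · have hcond : ((acc, true).2 && PySem.Str.startswith l "### ") = true := by rw [h]; rfl
      rw [if_pos hcond, fold_false]
      have h2 : PySem.Chars.startswith l.toList ['#', '#', '#', ' '] = true := by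
        have he : ("### " : String).toList = ['#', '#', '#', ' '] := by decide
        rw [← he, ← PySem.Str.startswith_eq]; exact h
      simp [rmFirstS, h2]
    · have hb : PySem.Str.startswith l "### " = false := by
        simpa [Bool.not_eq_true] using h
      have hcond : ¬ ((acc, true).2 && PySem.Str.startswith l "### ") = true := by
        rw [hb]; simp
      rw [if_neg hcond, ih]
      have hb2 : PySem.Chars.startswith l.toList ['#', '#', '#', ' '] = false := by
        have he : ("### " : String).toList = ['#', '#', '#', ' '] := by decide
        rw [← he, ← PySem.Str.startswith_eq]; exact hb
      simp [rmFirstS, hb2]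

lemma rmFirstS_map (M : List (List Char)) :
    rmFirstS (M.map String.ofList) = (rmFirst M).map String.ofList := by
  induction M with
  | nil => rfl
  | cons m ms ih =>
    have hsw : PySem.Str.startswith (String.ofList m) "### " = isHead m := by
      rw [PySem.Str.startswith_eq, String.toList_ofList]; rfl
    by_cases h : isHead m = true
    · have hc : PySem.Str.startswith (String.ofList m) "### " = true := by rw [hsw]; exact h
      have e1 : rmFirstS (String.ofList m :: List.map String.ofList ms)
          = List.map String.ofList ms := by
        simp only [rmFirstS, hc, if_true]
      have e2 : rmFirst (m :: ms) = ms := by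
        simp only [rmFirst, h, if_true]
      rw [List.map_cons, e1, e2]
    · have hb : isHead m = false := by simpa [Bool.not_eq_true] using h
      have hc : PySem.Str.startswith (String.ofList m) "### " = false := by rw [hsw]; exact hb
      have e1 : rmFirstS (String.ofList m :: List.map String.ofList ms)
          = String.ofList m :: rmFirstS (List.map String.ofList ms) := by
        simp only [rmFirstS, hc, Bool.false_eq_true, if_false]
      have e2 : rmFirst (m :: ms) = m :: rmFirst ms := by
        simp only [rmFirst, hb, Bool.false_eq_true, if_false]
      rw [List.map_cons, e1, e2, List.map_cons, ih]

lemma join_eq_joinNL : ∀ M : List (List Char), PySem.Chars.join ['\n'] M = joinNL M := by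
  intro M
  induction M with
  | nil => simp [PySem.Chars.join, List.intercalate, joinNL]
  | cons m ms ih =>
    cases ms with
    | nil => simp [PySem.Chars.join, List.intercalate, joinNL]
    | cons m' ms' =>
      simp only [PySem.Chars.join, List.intercalate] at ih ⊢
      rw [joinNL_cons _ _ (by simp), ← ih]
      simp [List.intersperse]

-- ---- port bridges ----

lemma A_eq (content : String) :
    clean_for_overlay content
      = String.ofList (PySem.Chars.strip (joinNL (rmFirst (mySplit content.toList)))) := by
  simp only [clean_for_overlay]
  have hsplit : (PySem.Str.split? content "\n").getD []
      = (mySplit content.toList).map String.ofList := by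
    simp [PySem.Str.split?, PySem.Chars.split?, nl_toList, splitOn_eq]
  rw [hsplit, fold_true]
  simp only [List.nil_append]
  rw [rmFirstS_map]
  simp only [PySem.Str.strip, PySem.Str.toList_join, nl_toList]
  have hmm : ∀ K : List (List Char), List.map String.toList (List.map String.ofList K) = K := by
    intro K
    induction K with
    | nil => rfl
    | cons a as ihh => simp [ihh, String.toList_ofList]
  rw [hmm, join_eq_joinNL]

lemma B_eq (content : String) :
    clean_for_overlay_alt content
      = String.ofList (PySem.Chars.strip (altCore content.toList)) := by
  simp only [clean_for_overlay_alt]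
  have hff : ∀ st : Int, PySem.Str.findFrom content "\n" st none
      = PySem.Chars.findFrom content.toList ['\n'] st none := by
    intro st; rw [PySem.Str.findFrom_eq, nl_toList]
  by_cases hs : PySem.Str.startswith content "### " = true
  · have hs' : PySem.Chars.startswith content.toList hd4 = true := by
      show PySem.Chars.startswith content.toList ("### ".toList) = true
      rw [← PySem.Str.startswith_eq]; exact hs
    simp only [hs, if_true, altCore, hs']
    rw [if_neg (by norm_num : ¬ (0 : Int) = -1)]
    simp only [altTail, hff]
    simp only [PySem.Str.strip, PySem.Str.toList_slice, String.toList_ofList]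
    split_ifs <;> rfl
  · have hsb : PySem.Str.startswith content "### " = false := by
      simpa [Bool.not_eq_true] using hs
    have hs' : PySem.Chars.startswith content.toList hd4 = false := by
      show PySem.Chars.startswith content.toList ("### ".toList) = false
      rw [← PySem.Str.startswith_eq]; exact hsb
    have hfe : PySem.Str.find content "\n### " = PySem.Chars.find content.toList nlH := by
      rw [PySem.Str.find_eq]; rfl
    simp only [hsb, Bool.false_eq_true, if_false, hfe, altCore, hs']
    by_cases hj : PySem.Chars.find content.toList nlH = -1
    · simp [hj, PySem.Str.strip]
    · have hj1 : ¬ (PySem.Chars.find content.toList nlH + 1 = -1) := by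
        have := PySem.Chars.neg_one_le_find content.toList nlH; omega
      simp only [hj, if_false, ne_eq, not_false_iff, if_true, if_neg hj1]
      simp only [altTail, hff]
      simp only [PySem.Str.strip, PySem.Str.toList_slice, String.toList_ofList]
      split_ifs <;> rfl

-- ---- prefix / infix / find facts ----

lemma prefix_nl_free : ∀ (p l t : List Char), '\n' ∉ p → '\n' ∉ l →
    (p <+: l ++ '\n' :: t ↔ p <+: l) := by
  intro p
  induction p with
  | nil => simp
  | cons a p' ih =>
    intro l t hp hl
    have ha : ¬ a = '\n' := fun h => hp (h ▸ List.mem_cons_self ..)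
    cases l with
    | nil =>
      simp only [List.nil_append]
      constructor
      · intro h
        rw [List.cons_prefix_cons] at h
        exact absurd h.1 ha
      · intro h
        have := h.length_le
        simp at this
    | cons b l' =>
      have hp' : '\n' ∉ p' := fun h => hp (List.mem_cons_of_mem _ h)
      have hl' : '\n' ∉ l' := fun h => hl (List.mem_cons_of_mem _ h)
      rw [List.cons_append, List.cons_prefix_cons, List.cons_prefix_cons,
        ih l' t hp' hl']

lemma infix_shift : ∀ (l t p : List Char), '\n' ∉ l →
    (('\n' :: p) <:+: (l ++ '\n' :: t) ↔ p <+: t ∨ ('\n' :: p) <:+: t) := by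
  intro l
  induction l with
  | nil =>
    intro t p _
    simp only [List.nil_append]
    rw [List.infix_cons_iff]
    simp [List.cons_prefix_cons]
  | cons c l' ih =>
    intro t p hl
    have hc : ¬ ('\n' : Char) = c := fun h => hl (h ▸ List.mem_cons_self ..)
    rw [List.cons_append, List.infix_cons_iff]
    have h1 : ¬ ('\n' :: p) <+: (c :: (l' ++ '\n' :: t)) := by
      rw [List.cons_prefix_cons]
      rintro ⟨h, -⟩; exact hc h
    simp only [h1, false_or]
    exact ih t p (fun h => hl (List.mem_cons_of_mem _ h))

lemma find_eq_natCast (s sub : List Char) (n : Nat) (h1 : sub <+: s.drop n)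
    (h2 : ∀ i, i < n → ¬ sub <+: s.drop i) : PySem.Chars.find s sub = (n : Int) := by
  have hinf : sub <:+: s := h1.isInfix.trans (List.drop_suffix n s).isInfix
  have h0 : 0 ≤ PySem.Chars.find s sub := (PySem.Chars.find_nonneg_iff s sub).mpr hinf
  obtain ⟨hp, hmin⟩ := PySem.Chars.find_spec h0
  have hle : n ≤ (PySem.Chars.find s sub).toNat := by
    by_contra hcon
    exact h2 _ (by omega) hp
  have hge : (PySem.Chars.find s sub).toNat ≤ n := by
    by_contra hcon
    exact hmin n (by omega) h1
  omega

lemma not_prefix_drop_append (l r p : List Char) (hl : '\n' ∉ l) :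
    ∀ i, i < l.length → ¬ ('\n' :: p) <+: (l ++ r).drop i := by
  intro i hi hpre
  rw [List.drop_append_of_le_length (Nat.le_of_lt hi)] at hpre
  rcases hd : l.drop i with _ | ⟨a, u⟩
  · have := congrArg List.length hd
    simp [List.length_drop] at this
    omega
  · rw [hd, List.cons_append, List.cons_prefix_cons] at hpre
    have ha : a ∈ l := by
      have : a ∈ l.drop i := by rw [hd]; exact List.mem_cons_self ..
      exact (List.drop_suffix i l).sublist.subset this
    exact hl (hpre.1 ▸ ha)

lemma find_nl_nil (x : List Char) (h : '\n' ∉ x) : PySem.Chars.find x ['\n'] = -1 := by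
  rw [PySem.Chars.find_eq_neg_one_iff, List.singleton_infix_iff]
  exact h

lemma find_nl_append (l t : List Char) (h : '\n' ∉ l) :
    PySem.Chars.find (l ++ '\n' :: t) ['\n'] = (l.length : Int) := by
  apply find_eq_natCast
  · rw [List.drop_left]
    exact ⟨t, rfl⟩
  · exact fun i hi => not_prefix_drop_append l ('\n' :: t) [] h i hi

lemma drop_len_add {α : Type _} (l r : List α) (i : Nat) :
    (l ++ r).drop (l.length + i) = r.drop i := by
  rw [← List.drop_drop, List.drop_left]

lemma take_len_add {α : Type _} (l r : List α) (i : Nat) :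
    (l ++ r).take (l.length + i) = l ++ r.take i := by
  induction l with
  | nil => simp
  | cons c l' ih =>
    simp only [List.cons_append, List.length_cons]
    rw [show l'.length + 1 + i = l'.length + i + 1 from by omega, List.take_succ_cons, ih]

lemma infix_nlH_not (x : List Char) (h : '\n' ∉ x) : ¬ nlH <:+: x := by
  intro hin
  have hmem : '\n' ∈ nlH := by rw [nlH_eq]; exact List.mem_cons_self ..
  exact h (hin.sublist.subset hmem)

lemma find_nlH_append (l t : List Char) (h : '\n' ∉ l) :
    PySem.Chars.find (l ++ '\n' :: t) nlH =
      if hd4 <+: t then (l.length : Int)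
      else if PySem.Chars.find t nlH = -1 then -1
      else (l.length : Int) + 1 + PySem.Chars.find t nlH := by
  split_ifs with h1 h2
  · apply find_eq_natCast
    · rw [List.drop_left, nlH_eq, List.cons_prefix_cons]
      exact ⟨rfl, h1⟩
    · intro i hi
      rw [nlH_eq]
      exact not_prefix_drop_append l _ hd4 h i hi
  · rw [PySem.Chars.find_eq_neg_one_iff] at h2 ⊢
    rw [nlH_eq, infix_shift l t hd4 h]
    rw [nlH_eq] at h2
    tauto
  · have hk0 : 0 ≤ PySem.Chars.find t nlH := by
      have := PySem.Chars.neg_one_le_find t nlH; omega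
    set k := (PySem.Chars.find t nlH).toNat with hkdef
    have hkk : PySem.Chars.find t nlH = (k : Int) := by omega
    obtain ⟨hp, hmin⟩ := PySem.Chars.find_spec (s := t) (sub := nlH) hk0
    rw [hkk]
    rw [show (l.length : Int) + 1 + (k : Int) = ((l.length + 1 + k : Nat) : Int) from by push_cast; ring]
    apply find_eq_natCast
    · rw [show l.length + 1 + k = l.length + (1 + k) from by omega, drop_len_add,
        show 1 + k = k + 1 from by omega, List.drop_succ_cons]
      rw [← hkdef] at hp
      exact hp
    · intro i hi
      rcases Nat.lt_or_ge i l.length with hil | hil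
      · rw [nlH_eq]
        exact not_prefix_drop_append l _ hd4 h i hil
      · rcases Nat.eq_or_lt_of_le hil with he | hgt
        · rw [← he, List.drop_left, nlH_eq, List.cons_prefix_cons]
          rintro ⟨-, hh⟩; exact h1 hh
        · rw [show i = l.length + (1 + (i - l.length - 1)) from by omega, drop_len_add,
            show 1 + (i - l.length - 1) = (i - l.length - 1) + 1 from by omega, List.drop_succ_cons]
          exact hmin (i - l.length - 1) (by omega)

-- ---- altTail / altCore computation ----

lemma slice_to_nat (xs : List Char) (n : Nat) :
    PySem.Chars.slice xs none (some (n : Int)) = xs.take n := by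
  show PySem.List.slice xs none (some (n : Int)) = xs.take n
  rw [PySem.List.slice_to xs (by positivity)]
  simp

lemma slice_from_nat (xs : List Char) (n : Nat) :
    PySem.Chars.slice xs (some (n : Int)) none = xs.drop n := by
  show PySem.List.slice xs (some (n : Int)) none = xs.drop n
  rw [PySem.List.slice_from xs (by positivity)]
  simp

lemma altTail_spec (cs : List Char) (n : Nat) (hn : n ≤ cs.length) :
    altTail cs (n : Int) =
      if PySem.Chars.find (cs.drop n) ['\n'] = -1 then cs.take n
      else cs.take n ++ cs.drop (n + (PySem.Chars.find (cs.drop n) ['\n']).toNat + 1) := by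
  unfold altTail
  rw [PySem.Chars.findFrom_natCast cs ['\n'] n hn]
  by_cases h : PySem.Chars.find (cs.drop n) ['\n'] = -1
  · simp [h]
  · have hf0 : 0 ≤ PySem.Chars.find (cs.drop n) ['\n'] := by
      have := PySem.Chars.neg_one_le_find (cs.drop n) ['\n']; omega
    have hne : ¬ ((n : Int) + PySem.Chars.find (cs.drop n) ['\n'] = -1) := by omega
    simp only [h, if_false, if_neg hne]
    rw [show (n : Int) + PySem.Chars.find (cs.drop n) ['\n'] + 1
        = ((n + (PySem.Chars.find (cs.drop n) ['\n']).toNat + 1 : Nat) : Int) from by omega]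
    rw [slice_to_nat, slice_from_nat]

lemma altCore_single_head (m : List Char) (hm : isHead m = true) (hnl : '\n' ∉ m) :
    altCore m = [] := by
  have hsw : PySem.Chars.startswith m hd4 = true := hm
  simp only [altCore, hsw, if_true]
  rw [show (0 : Int) = ((0 : Nat) : Int) from rfl, altTail_spec m 0 (by omega)]
  simp [find_nl_nil m hnl]

lemma startswith_false_of_not_prefix (cs : List Char) (h : ¬ hd4 <+: cs) :
    PySem.Chars.startswith cs hd4 = false := by
  have : ¬ (PySem.Chars.startswith cs hd4 = true) := by
    rw [PySem.Chars.startswith_iff]; exact h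
  simpa [Bool.not_eq_true] using this

lemma altCore_append (l t : List Char) (hl : '\n' ∉ l) (hh : ¬ hd4 <+: l)
    (hex : hd4 <+: t ∨ nlH <:+: t) :
    altCore (l ++ '\n' :: t) = l ++ '\n' :: altCore t := by
  have hlen : (l ++ '\n' :: t).length = l.length + t.length + 1 := by
    simp [List.length_append]
    omega
  have hsw : PySem.Chars.startswith (l ++ '\n' :: t) hd4 = false := by
    apply startswith_false_of_not_prefix
    rw [prefix_nl_free hd4 l t hd4_no_nl hl]
    exact hh
  have hfind := find_nlH_append l t hl
  by_cases h1 : hd4 <+: t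
  · rw [if_pos h1] at hfind
    have hswt : PySem.Chars.startswith t hd4 = true := (PySem.Chars.startswith_iff t hd4).mpr h1
    have hne : ¬ (PySem.Chars.find (l ++ '\n' :: t) nlH = -1) := by rw [hfind]; omega
    simp only [altCore, hsw, Bool.false_eq_true, if_false, if_neg hne, hswt, if_true]
    rw [hfind]
    rw [show (l.length : Int) + 1 = ((l.length + 1 : Nat) : Int) from by push_cast; ring]
    rw [altTail_spec (l ++ '\n' :: t) (l.length + 1) (by rw [hlen]; omega),
      show (0 : Int) = ((0 : Nat) : Int) from rfl, altTail_spec t 0 (by omega)]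
    have hdrop : (l ++ '\n' :: t).drop (l.length + 1) = t := by
      rw [drop_len_add l ('\n' :: t) 1]; rfl
    have htake : (l ++ '\n' :: t).take (l.length + 1) = l ++ ['\n'] := by
      rw [take_len_add l ('\n' :: t) 1]; rfl
    rw [hdrop]
    simp only [List.drop_zero, List.take_zero, List.nil_append, Nat.zero_add]
    by_cases hf : PySem.Chars.find t ['\n'] = -1
    · simp [hf, htake]
    · simp only [hf, if_false]
      have hdrop2 : (l ++ '\n' :: t).drop (l.length + 1 + (PySem.Chars.find t ['\n']).toNat + 1)
          = t.drop ((PySem.Chars.find t ['\n']).toNat + 1) := by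
        rw [show l.length + 1 + (PySem.Chars.find t ['\n']).toNat + 1
            = l.length + ((PySem.Chars.find t ['\n']).toNat + 1 + 1) from by omega,
          drop_len_add]
        rfl
      rw [hdrop2, htake]
      simp
  · have h2 : nlH <:+: t := hex.resolve_left h1
    have hne2 : PySem.Chars.find t nlH ≠ -1 := (PySem.Chars.find_ne_neg_one_iff t nlH).mpr h2
    have hk0 : 0 ≤ PySem.Chars.find t nlH := by
      have := PySem.Chars.neg_one_le_find t nlH; omega
    set k := (PySem.Chars.find t nlH).toNat with hkdef
    have hkk : PySem.Chars.find t nlH = (k : Int) := by omega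
    have hl5 : nlH.length = 5 := by decide
    have hkb : k + 1 ≤ t.length := by
      obtain ⟨hp, -⟩ := PySem.Chars.find_spec (s := t) (sub := nlH) hk0
      have := hp.length_le
      rw [List.length_drop] at this
      omega
    rw [if_neg h1, if_neg hne2] at hfind
    have hswt : PySem.Chars.startswith t hd4 = false := startswith_false_of_not_prefix t h1
    have hne : ¬ (PySem.Chars.find (l ++ '\n' :: t) nlH = -1) := by
      rw [hfind, hkk]; omega
    simp only [altCore, hsw, hswt, Bool.false_eq_true, if_false, if_neg hne, if_neg hne2]
    rw [hfind, hkk]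
    rw [show (l.length : Int) + 1 + (k : Int) + 1 = ((l.length + 1 + (k + 1) : Nat) : Int) from by
      push_cast; ring]
    rw [show (k : Int) + 1 = ((k + 1 : Nat) : Int) from by push_cast; ring]
    rw [altTail_spec (l ++ '\n' :: t) (l.length + 1 + (k + 1)) (by rw [hlen]; omega),
      altTail_spec t (k + 1) hkb]
    have hdrop : (l ++ '\n' :: t).drop (l.length + 1 + (k + 1)) = t.drop (k + 1) := by
      rw [show l.length + 1 + (k + 1) = l.length + (k + 2) from by omega, drop_len_add,
        show k + 2 = (k + 1) + 1 from by omega, List.drop_succ_cons]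
    have htake : (l ++ '\n' :: t).take (l.length + 1 + (k + 1)) = l ++ '\n' :: t.take (k + 1) := by
      rw [show l.length + 1 + (k + 1) = l.length + (k + 2) from by omega, take_len_add,
        show k + 2 = (k + 1) + 1 from by omega, List.take_succ_cons]
    rw [hdrop, htake]
    by_cases hf : PySem.Chars.find (t.drop (k + 1)) ['\n'] = -1
    · simp [hf]
    · simp only [hf, if_false]
      have hdrop2 : (l ++ '\n' :: t).drop
            (l.length + 1 + (k + 1) + (PySem.Chars.find (t.drop (k + 1)) ['\n']).toNat + 1)
          = t.drop (k + 1 + (PySem.Chars.find (t.drop (k + 1)) ['\n']).toNat + 1) := by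
        rw [show l.length + 1 + (k + 1) + (PySem.Chars.find (t.drop (k + 1)) ['\n']).toNat + 1
            = l.length + ((k + 1 + (PySem.Chars.find (t.drop (k + 1)) ['\n']).toNat + 1) + 1)
            from by omega, drop_len_add,
          show (k + 1 + (PySem.Chars.find (t.drop (k + 1)) ['\n']).toNat + 1) + 1
            = (k + 1 + (PySem.Chars.find (t.drop (k + 1)) ['\n']).toNat + 1) + 1 from rfl]
        rw [List.drop_succ_cons]
      rw [hdrop2]
      simp

-- ---- heading existence on line lists ----

lemma prefix_joinNL (m : List Char) (ms : List (List Char)) (hm : '\n' ∉ m) :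
    (hd4 <+: joinNL (m :: ms)) ↔ hd4 <+: m := by
  cases ms with
  | nil => simp [joinNL]
  | cons m' ms' =>
    rw [joinNL_cons _ _ (by simp)]
    exact prefix_nl_free hd4 m _ hd4_no_nl hm

lemma rmFirst_id : ∀ M : List (List Char), (∀ m ∈ M, isHead m = false) → rmFirst M = M := by
  intro M
  induction M with
  | nil => intro _; rfl
  | cons m ms ih =>
    intro h
    have hm := h m (List.mem_cons_self ..)
    simp [rmFirst, hm, ih (fun x hx => h x (List.mem_cons_of_mem _ hx))]

lemma no_heading_no_infix : ∀ M : List (List Char), (∀ m ∈ M, '\n' ∉ m) →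
    (∀ m ∈ M, isHead m = false) → ¬ nlH <:+: joinNL M := by
  intro M
  induction M with
  | nil =>
    intro _ _ hin
    exact absurd (List.sublist_nil.mp hin.sublist) (by decide)
  | cons m ms ih =>
    intro hnl hnh
    cases ms with
    | nil =>
      simp only [joinNL]
      exact infix_nlH_not m (hnl m (List.mem_cons_self ..))
    | cons m' ms' =>
      rw [joinNL_cons _ _ (by simp), nlH_eq,
        infix_shift _ _ _ (hnl m (List.mem_cons_self ..))]
      rintro (hp | hin)
      · rw [prefix_joinNL m' ms' (hnl m' (by simp))] at hp
        have hh := hnh m' (by simp)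
        have : isHead m' = true := (PySem.Chars.startswith_iff m' hd4).mpr hp
        rw [hh] at this
        exact Bool.false_ne_true this
      · rw [← nlH_eq] at hin
        exact ih (fun x hx => hnl x (List.mem_cons_of_mem _ hx))
          (fun x hx => hnh x (List.mem_cons_of_mem _ hx)) hin

lemma heading_infix : ∀ M : List (List Char), (∀ m ∈ M, '\n' ∉ m) → M.any isHead = true →
    (hd4 <+: joinNL M ∨ nlH <:+: joinNL M) := by
  intro M
  induction M with
  | nil => intro _ h; simp at h
  | cons m ms ih =>
    intro hnl hany
    by_cases hm : isHead m = true
    · left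
      rw [prefix_joinNL m ms (hnl m (List.mem_cons_self ..))]
      exact (PySem.Chars.startswith_iff m hd4).mp hm
    · have hmb : isHead m = false := by simpa [Bool.not_eq_true] using hm
      have hany' : ms.any isHead = true := by
        simpa [List.any_cons, hmb] using hany
      cases ms with
      | nil => simp at hany'
      | cons m' ms' =>
        right
        rw [joinNL_cons _ _ (by simp), nlH_eq,
          infix_shift _ _ _ (hnl m (List.mem_cons_self ..))]
        rcases ih (fun x hx => hnl x (List.mem_cons_of_mem _ hx)) hany' with h | h
        · exact Or.inl h
        · rw [nlH_eq] at h
          exact Or.inr h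

-- ---- the core equality ----

lemma isHead_iff (l : List Char) : isHead l = true ↔ hd4 <+: l :=
  PySem.Chars.startswith_iff l hd4

lemma core : ∀ L : List (List Char), (∀ l ∈ L, '\n' ∉ l) → L ≠ [] →
    altCore (joinNL L) = joinNL (rmFirst L) ∨
    altCore (joinNL L) = joinNL (rmFirst L) ++ ['\n'] := by
  intro L
  induction L with
  | nil => intro _ h; exact absurd rfl h
  | cons l ls ih =>
    intro hnl _
    have hlnl : '\n' ∉ l := hnl l (List.mem_cons_self ..)
    have hnl' : ∀ x ∈ ls, '\n' ∉ x := fun x hx => hnl x (List.mem_cons_of_mem _ hx)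
    by_cases hh : isHead l = true
    · left
      cases ls with
      | nil =>
        simp only [rmFirst, hh, if_true, joinNL]
        exact altCore_single_head l hh hlnl
      | cons m ms =>
        rw [joinNL_cons _ _ (by simp)]
        have hsw : PySem.Chars.startswith (l ++ '\n' :: joinNL (m :: ms)) hd4 = true := by
          rw [PySem.Chars.startswith_iff, prefix_nl_free hd4 l _ hd4_no_nl hlnl]
          exact (isHead_iff l).mp hh
        simp only [altCore, hsw, if_true]
        rw [show (0 : Int) = ((0 : Nat) : Int) from rfl,
          altTail_spec (l ++ '\n' :: joinNL (m :: ms)) 0 (by omega)]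
        simp only [List.drop_zero]
        rw [find_nl_append l (joinNL (m :: ms)) hlnl]
        rw [if_neg (by omega : ¬ ((l.length : Int) = -1))]
        simp only [List.take_zero, List.nil_append, Int.toNat_natCast, Nat.zero_add]
        rw [drop_len_add l ('\n' :: joinNL (m :: ms)) 1]
        simp [rmFirst, hh]
    · have hhb : isHead l = false := by simpa [Bool.not_eq_true] using hh
      have hhp : ¬ hd4 <+: l := fun hp => hh ((isHead_iff l).mpr hp)
      by_cases hany : ls.any isHead = true
      · cases ls with
        | nil => simp at hany
        | cons m ms =>
          rw [joinNL_cons _ _ (by simp)]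
          have hex := heading_infix (m :: ms) (fun x hx => hnl' x hx) hany
          rw [altCore_append l (joinNL (m :: ms)) hlnl hhp hex]
          have hrml : rmFirst (l :: m :: ms) = l :: rmFirst (m :: ms) := by
            by_cases hm : isHead m = true <;> simp [rmFirst, hhb, hm]
          rw [hrml]
          rcases hrm : rmFirst (m :: ms) with _ | ⟨r, rs⟩
          · have hmm : isHead m = true ∧ ms = [] := by
              by_cases hm : isHead m = true
              · refine ⟨hm, ?_⟩
                simpa [rmFirst, hm] using hrm
              · exfalso
                have hmb : isHead m = false := by simpa [Bool.not_eq_true] using hm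
                simp [rmFirst, hmb] at hrm
            obtain ⟨hm1, hm2⟩ := hmm
            subst hm2
            right
            have hz : altCore (joinNL [m]) = [] := by
              simpa [joinNL] using altCore_single_head m hm1 (hnl' m (by simp))
            rw [hz]
            simp [joinNL]
          · have hj : joinNL (l :: r :: rs) = l ++ '\n' :: joinNL (r :: rs) :=
              joinNL_cons _ _ (by simp)
            rcases ih hnl' (by simp) with h | h <;> rw [hrm] at h
            · left; rw [h, hj]
            · right; rw [h, hj]; simp
      · left
        have hanyb : ∀ x ∈ ls, isHead x = false := by
          intro x hx
          rcases Bool.eq_false_or_eq_true (isHead x) with hb | hb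
          · exact absurd (List.any_eq_true.mpr ⟨x, hx, hb⟩) hany
          · exact hb
        have hnone : ∀ x ∈ l :: ls, isHead x = false := by
          intro x hx
          rcases List.mem_cons.mp hx with rfl | hx
          · exact hhb
          · exact hanyb x hx
        rw [rmFirst_id _ hnone]
        have hswf : PySem.Chars.startswith (joinNL (l :: ls)) hd4 = false := by
          apply startswith_false_of_not_prefix
          rw [prefix_joinNL l ls hlnl]
          exact hhp
        have hfind : PySem.Chars.find (joinNL (l :: ls)) nlH = -1 := by
          rw [PySem.Chars.find_eq_neg_one_iff]
          exact no_heading_no_infix (l :: ls) hnl hnone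
        simp [altCore, hswf, hfind]

-- ---- stripping absorbs a trailing newline ----

lemma strip_append_nl (x : List Char) :
    PySem.Chars.strip (x ++ ['\n']) = PySem.Chars.strip x := by
  have hsp : PySem.Chars.isspace '\n' = true := by decide
  simp only [PySem.Chars.strip, PySem.Chars.lstrip, PySem.Chars.rstrip, List.dropWhile_append]
  by_cases h : (List.dropWhile PySem.Chars.isspace x).isEmpty = true
  · have hx : List.dropWhile PySem.Chars.isspace x = [] := by
      simpa [List.isEmpty_iff] using h
    simp [hx, hsp]
  · rw [if_neg h]
    rw [List.reverse_append]
    simp [hsp]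

-- ===== VERDICT (by name: the statement is the Claim_ definition above) =====
theorem clean_for_overlay_spec : Claim_equal_clean_for_overlay := by
  intro content _
  unfold Spec_clean_for_overlay
  rw [A_eq, B_eq]
  have h1 := mySplit_no_nl content.toList
  have h2 := mySplit_ne_nil content.toList
  have h3 := join_mySplit content.toList
  rcases core (mySplit content.toList) h1 h2 with h | h
  · rw [h3] at h; rw [h]
  · rw [h3] at h; rw [h, strip_append_nl]
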